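-- pv_equiv track=rewrite | github.com/ligulfzhou/PyBaseProject | lib/utils.py | sum_list_columns
-- ===== SOURCE A (Python) =====
-- def sum_list_columns(datas, to_sum_columns=[], attached_dict={}):
--     data = {}
--     for col in to_sum_columns:
--         data.update({
--             col: sum([i[col] for i in datas])
--         })
--
--     data.update(attached_dict)
--     return data
-- ===== SOURCE B (Python) =====
-- def sum_list_columns(datas, to_sum_columns=[], attached_dict={}):
--     data = {col: 0 for col in to_sum_columns}
--     for row in datas:
--         for col in data:
--             data[col] += row[col]
--     data.update(attached_dict)
--     return data
-- ===== Notes on version B (the rewrite author's own statement) =====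
-- stated objective: alternative
-- what changed: Instead of one independent full scan of datas per column, B pre-seeds a dict mapping every requested column to 0 and makes a single pass over the rows, adding each row's value to every column total simultaneously (in-place += on the seeded dict), then applies attached_dict; both versions raise KeyError exactly when a requested column is missing from some row, which Pre_ excludes.
import Mathlib
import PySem

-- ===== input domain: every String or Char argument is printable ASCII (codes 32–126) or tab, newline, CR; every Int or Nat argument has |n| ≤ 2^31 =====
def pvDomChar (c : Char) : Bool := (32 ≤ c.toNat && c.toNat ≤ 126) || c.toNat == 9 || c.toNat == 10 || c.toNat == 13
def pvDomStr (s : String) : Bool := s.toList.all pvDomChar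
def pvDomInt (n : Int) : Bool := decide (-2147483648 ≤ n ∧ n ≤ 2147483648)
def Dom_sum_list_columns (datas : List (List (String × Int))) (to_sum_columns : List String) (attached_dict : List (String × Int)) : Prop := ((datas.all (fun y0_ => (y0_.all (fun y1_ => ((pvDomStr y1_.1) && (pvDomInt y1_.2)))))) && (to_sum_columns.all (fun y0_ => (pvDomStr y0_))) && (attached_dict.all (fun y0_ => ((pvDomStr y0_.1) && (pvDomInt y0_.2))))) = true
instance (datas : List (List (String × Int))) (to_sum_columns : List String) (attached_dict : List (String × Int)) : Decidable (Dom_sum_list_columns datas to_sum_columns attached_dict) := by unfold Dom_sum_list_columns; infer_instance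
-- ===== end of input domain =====

-- B replaces A's per-column full scans of `datas` by a single pass over the rows that
-- accumulates all requested columns simultaneously, in place, in a dict pre-seeded with 0
-- (alternative decomposition, similar cost); it raises KeyError exactly where A does
-- (a requested column missing from some row), which Pre_ excludes.


-- ===== PORT A =====
-- data = {}; for col in to_sum_columns: data.update({col: sum([i[col] for i in datas])});
-- data.update(attached_dict); return data
-- Each row i is a Python dict, ported via PySem.Dict.ofList (last duplicate wins, like dict());
-- `i[col]` is ported as `(Dict.ofList i).getD col 0`: exact wherever col is a key of i
-- (Pre_ guarantees that); a missing key is Python's KeyError, excluded by Pre_.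
def sum_list_columns (datas : List (List (String × Int))) (to_sum_columns : List String) (attached_dict : List (String × Int)) : List (String × Int) :=
  let data : PySem.Dict String Int :=
    to_sum_columns.foldl
      (fun d col => d.insert col ((datas.map (fun i => (PySem.Dict.ofList i).getD col 0)).sum))
      PySem.Dict.empty
  (attached_dict.foldl (fun d kv => d.insert kv.1 kv.2) data).items

-- ===== PORT B =====
-- data = {col: 0 for col in to_sum_columns}
-- for row in datas: for col in data: data[col] += row[col]
-- data.update(attached_dict); return data
-- The dict comprehension is `Dict.ofList` of the mapped pair list (Python's rule exactly);
-- `for col in data` iterates the dict's keys (only values are overwritten inside the loop,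
-- so the key list is fixed) — a fold over `d.keys`; `data[col] += row[col]` is
-- `d.modify col 0 (· + row[col])`, exact because col is a key of data, with `row[col]`
-- as `(Dict.ofList row).getD col 0` — exact wherever col is a key of row (guaranteed by
-- Pre_, whose violation is Python's KeyError); `data.update(attached_dict)` is `Dict.update`.
def sum_list_columns_alt (datas : List (List (String × Int))) (to_sum_columns : List String) (attached_dict : List (String × Int)) : List (String × Int) :=
  let data0 : PySem.Dict String Int := PySem.Dict.ofList (to_sum_columns.map (fun col => (col, 0)))
  let data1 :=
    datas.foldl
      (fun d row =>
        d.keys.foldl (fun d' col => d'.modify col 0 (· + (PySem.Dict.ofList row).getD col 0)) d)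
      data0
  (data1.update attached_dict).items

-- ===== PRECONDITION & SPEC =====
-- Pre_ excludes exactly the inputs on which Python A raises KeyError: a requested
-- column missing from some row.
def Pre_sum_list_columns (datas : List (List (String × Int))) (to_sum_columns : List String) (attached_dict : List (String × Int)) : Prop :=
  ∀ col ∈ to_sum_columns, ∀ row ∈ datas, col ∈ row.map Prod.fst
instance (datas : List (List (String × Int))) (to_sum_columns : List String) (attached_dict : List (String × Int)) : Decidable (Pre_sum_list_columns datas to_sum_columns attached_dict) := by unfold Pre_sum_list_columns; infer_instance

def pvWitness_sum_list_columns : (List (List (String × Int))) × List String × (List (String × Int)) :=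
  ([[("a", 1), ("b", 2)], [("a", 3), ("b", 4)]], ["a", "b"], [("c", 5)])

def Spec_sum_list_columns (datas : List (List (String × Int))) (to_sum_columns : List String) (attached_dict : List (String × Int)) (out : List (String × Int)) : Prop := out = sum_list_columns_alt datas to_sum_columns attached_dict
instance (datas : List (List (String × Int))) (to_sum_columns : List String) (attached_dict : List (String × Int)) (out : List (String × Int)) : Decidable (Spec_sum_list_columns datas to_sum_columns attached_dict out) := by unfold Spec_sum_list_columns; infer_instance

-- ===== CLAIM (what is proved, stated in full; the proofs are below) =====
def Claim_equal_sum_list_columns : Prop := ∀ (datas : List (List (String × Int))) (to_sum_columns : List String) (attached_dict : List (String × Int)), Dom_sum_list_columns datas to_sum_columns attached_dict → Pre_sum_list_columns datas to_sum_columns attached_dict → Spec_sum_list_columns datas to_sum_columns attached_dict (sum_list_columns datas to_sum_columns attached_dict)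

-- ===== LEMMAS AND PROOFS =====

-- The two seeding folds: the value stored at k is the (position-independent) inserted value.
lemma getD_foldl_insert_fun (cols : List String) (f : String → Int) (d : PySem.Dict String Int) (k : String) :
    (cols.foldl (fun d col => d.insert col (f col)) d).getD k 0
      = if k ∈ cols then f k else d.getD k 0 := by
  induction cols generalizing d with
  | nil => simp
  | cons c cs ih =>
    simp only [List.foldl_cons, ih, PySem.Dict.getD_insert, List.mem_cons]
    by_cases h1 : k ∈ cs <;> by_cases h2 : k = c <;> simp [h1, h2]

lemma keys_seed (cols : List String) (f : String → Int) :
    (cols.foldl (fun d col => d.insert col (f col)) (PySem.Dict.empty : PySem.Dict String Int)).keys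
      = PySem.Set.ofList cols := by
  rw [PySem.Dict.keys_foldl_insert, PySem.Dict.keys_empty, PySem.Set.update_nil_left]

-- B's dict comprehension, rewritten as the fold the seed lemmas speak about.
lemma ofList_map_pair (cols : List String) (f : String → Int) :
    PySem.Dict.ofList (cols.map (fun col => (col, f col)))
      = cols.foldl (fun d col => d.insert col (f col)) PySem.Dict.empty := by
  show (cols.map _).foldl (fun d (p : String × Int) => d.insert p.1 p.2) PySem.Dict.empty = _
  rw [List.foldl_map]

-- B's inner loop (over keys already present in d): keys are unchanged …
lemma colstep_keys (ks : List String) (v : String → Int) (d : PySem.Dict String Int)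
    (hks : ∀ c ∈ ks, c ∈ d.keys) :
    (ks.foldl (fun d' col => d'.modify col 0 (· + v col)) d).keys = d.keys := by
  induction ks generalizing d with
  | nil => rfl
  | cons c cs ih =>
    simp only [List.foldl_cons]
    have hc : d.contains c = true :=
      (PySem.Dict.contains_iff_mem_keys _ _).mpr (hks c (List.mem_cons_self ..))
    have hk : (d.modify c 0 (· + v c)).keys = d.keys := by
      rw [PySem.Dict.keys_modify, PySem.Dict.keys_insert_of_contains (h := hc)]
    rw [ih _ (fun x hx => hk ▸ hks x (List.mem_cons_of_mem _ hx)), hk]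

-- … and each visited entry grows by this row's value at that key.
lemma colstep_getD (ks : List String) (v : String → Int) (d : PySem.Dict String Int) (k : String)
    (hnd : ks.Nodup) :
    (ks.foldl (fun d' col => d'.modify col 0 (· + v col)) d).getD k 0
      = d.getD k 0 + (if k ∈ ks then v k else 0) := by
  induction ks generalizing d with
  | nil => simp
  | cons c cs ih =>
    simp only [List.nodup_cons] at hnd
    simp only [List.foldl_cons, ih _ hnd.2, PySem.Dict.getD_modify, List.mem_cons]
    by_cases h2 : k = c
    · subst h2; simp [fun h => hnd.1 h]
    · by_cases h1 : k ∈ cs <;> simp [h1, h2]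

-- B's outer loop over the rows accumulates the per-column sums of A.
lemma datas_fold_getD (datas : List (List (String × Int))) (d : PySem.Dict String Int)
    (k : String) (hnd : d.keys.Nodup) (hk : k ∈ d.keys) :
    (datas.foldl (fun d row => d.keys.foldl (fun d' col => d'.modify col 0 (· + (PySem.Dict.ofList row).getD col 0)) d) d).getD k 0
      = d.getD k 0 + (datas.map (fun i => (PySem.Dict.ofList i).getD k 0)).sum := by
  induction datas generalizing d with
  | nil => simp
  | cons row rest ih =>
    simp only [List.foldl_cons, List.map_cons, List.sum_cons]
    have hkeys : (d.keys.foldl (fun d' col => d'.modify col 0 (· + (PySem.Dict.ofList row).getD col 0)) d).keys = d.keys :=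
      colstep_keys d.keys (fun col => (PySem.Dict.ofList row).getD col 0) d (fun _ h => h)
    rw [ih _ (by rw [hkeys]; exact hnd) (by rw [hkeys]; exact hk), colstep_getD _ _ _ _ hnd, if_pos hk]
    ring

lemma datas_fold_keys (datas : List (List (String × Int))) (d : PySem.Dict String Int) :
    (datas.foldl (fun d row => d.keys.foldl (fun d' col => d'.modify col 0 (· + (PySem.Dict.ofList row).getD col 0)) d) d).keys
      = d.keys := by
  induction datas generalizing d with
  | nil => rfl
  | cons row rest ih =>
    simp only [List.foldl_cons]
    rw [ih, colstep_keys _ _ _ (fun _ h => h)]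

theorem sum_list_columns_spec : Claim_equal_sum_list_columns := by
  intro datas cols att _hdom _hpre
  unfold Spec_sum_list_columns sum_list_columns sum_list_columns_alt
  simp only []
  rw [ofList_map_pair cols (fun _ => 0),
      show (PySem.Dict.update : PySem.Dict String Int → List (String × Int) → PySem.Dict String Int)
        = fun d l => l.foldl (fun d kv => d.insert kv.1 kv.2) d from rfl]
  -- core equality of the two accumulated dicts (the final attached_dict fold is identical)
  set F : String → Int := fun col => (datas.map (fun i => (PySem.Dict.ofList i).getD col 0)).sum with hF
  set dA := cols.foldl (fun d col => d.insert col (F col)) (PySem.Dict.empty : PySem.Dict String Int) with hdA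
  set d0 := cols.foldl (fun d col => d.insert col 0) (PySem.Dict.empty : PySem.Dict String Int) with hd0
  set dB := datas.foldl (fun d row => d.keys.foldl (fun d' col => d'.modify col 0 (· + (PySem.Dict.ofList row).getD col 0)) d) d0 with hdB
  have key : dA = dB := by
    have hkA : dA.keys = PySem.Set.ofList cols := keys_seed cols F
    have hk0 : d0.keys = PySem.Set.ofList cols := keys_seed cols (fun _ => 0)
    have hkB : dB.keys = PySem.Set.ofList cols := by rw [hdB, datas_fold_keys, hk0]
    have hndA : dA.keys.Nodup := PySem.Dict.nodup_keys_foldl_insert _ _ _ PySem.Dict.nodup_keys_empty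
    have hnd0 : d0.keys.Nodup := PySem.Dict.nodup_keys_foldl_insert _ _ _ PySem.Dict.nodup_keys_empty
    have hndB : dB.keys.Nodup := by rw [hkB, ← hkA]; exact hndA
    apply PySem.Dict.ext
    rw [PySem.Dict.items_eq_map_keys dA hndA 0, PySem.Dict.items_eq_map_keys dB hndB 0, hkA, hkB]
    apply List.map_congr_left
    intro k hkmem
    have hkcols : k ∈ cols := (PySem.List.mem_dedup cols k).mp hkmem
    have hAval : dA.getD k 0 = F k := by
      rw [hdA, getD_foldl_insert_fun, if_pos hkcols]
    have h0val : d0.getD k 0 = 0 := by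
      rw [hd0, getD_foldl_insert_fun, if_pos hkcols]
    have hBval : dB.getD k 0 = F k := by
      rw [hdB, datas_fold_getD _ _ _ hnd0 (hk0 ▸ hkmem), h0val, hF, zero_add]
    rw [hAval, hBval]
  rw [key]
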